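-- pv_equiv track=rewrite | github.com/zhenglz/ProtDesignTools | tools/chimeric_design.py | extract_loop_region
-- ===== SOURCE A (Python) =====
-- def extract_loop_region(a3m_seq, query_seq, q_start, q_end):
--     """
--     Given an A3M-aligned sequence and the query (PH20M3), extract the
--     sub-sequence corresponding to query positions q_start..q_end (1-based).
--
--     Walks through the alignment counting non-gap positions in the query.
--     Returns the donor sequence with gaps stripped.
--     """
--     q_idx = 0  # number of non-gap positions seen in query
--     donor_chars = []
--     for q_char, d_char in zip(query_seq, a3m_seq):
--         if q_char != "-":
--             q_idx += 1
--         if q_start <= q_idx <= q_end: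
--             if d_char != "-":
--                 donor_chars.append(d_char.upper())
--     return "".join(donor_chars)
-- ===== SOURCE B (Python) =====
-- def extract_loop_region(a3m_seq, query_seq, q_start, q_end):
--     """Prefix-count + slice: build the cumulative non-gap query counts, locate
--     the contiguous included column block [lo, hi) by counting how many counts
--     fall below q_start / at most q_end (counts are monotone), then strip gaps
--     and upper-case the donor slice."""
--     n = min(len(query_seq), len(a3m_seq))
--     counts = []
--     c = 0
--     for ch in query_seq[:n]:
--         if ch != "-":
--             c += 1
--         counts.append(c)
--     lo = sum(1 for c in counts if c < q_start)
--     hi = sum(1 for c in counts if c <= q_end)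
--     return "".join(ch.upper() for ch in a3m_seq[lo:hi] if ch != "-")
-- ===== Notes on version B (the rewrite author's own statement) =====
-- stated objective: alternative
-- what changed: Replaces A's single scan that tests q_start <= count <= q_end at every column by a prefix-count construction: build the cumulative non-gap query counts, derive the contiguous included column interval [lo, hi) by counting entries below q_start / at most q_end, then gap-strip and upper-case the donor slice a3m_seq[lo:hi].
import Mathlib
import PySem

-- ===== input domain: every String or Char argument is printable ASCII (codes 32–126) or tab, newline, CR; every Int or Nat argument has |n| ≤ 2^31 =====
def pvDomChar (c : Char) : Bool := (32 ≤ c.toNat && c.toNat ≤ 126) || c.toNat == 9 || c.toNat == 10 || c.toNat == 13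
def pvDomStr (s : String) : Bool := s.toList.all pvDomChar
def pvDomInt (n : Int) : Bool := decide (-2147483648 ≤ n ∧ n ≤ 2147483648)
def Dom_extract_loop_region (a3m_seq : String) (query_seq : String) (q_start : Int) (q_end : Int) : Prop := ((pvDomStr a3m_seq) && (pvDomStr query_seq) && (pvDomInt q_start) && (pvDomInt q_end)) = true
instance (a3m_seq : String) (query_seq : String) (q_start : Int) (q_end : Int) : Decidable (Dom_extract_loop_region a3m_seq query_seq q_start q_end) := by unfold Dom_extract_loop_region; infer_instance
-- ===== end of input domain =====

-- B replaces A's per-column range test by a prefix-count construction: cumulative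
-- non-gap query counts give the contiguous included column interval [lo, hi),
-- and the result is the gap-stripped, upper-cased donor slice over it.

-- ===== PORT A =====
-- the body of A's for-loop over zip(query_seq, a3m_seq); state = (q_idx, donor_chars)
def elrStepA (q_start q_end : Int) (st : Int × List Char) (p : Char × Char) : Int × List Char :=
  let q_idx := if p.1 ≠ '-' then st.1 + 1 else st.1
  (q_idx,
    if q_start ≤ q_idx ∧ q_idx ≤ q_end then
      (if p.2 ≠ '-' then st.2 ++ [PySem.Chars.upperChar p.2] else st.2)
    else st.2)

def extract_loop_region (a3m_seq : String) (query_seq : String) (q_start : Int) (q_end : Int) : String :=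
  let st := (List.zip query_seq.toList a3m_seq.toList).foldl (elrStepA q_start q_end) (0, [])
  String.ofList st.2

-- ===== PORT B =====
-- Source B's first loop: the running cumulative non-gap counts over query_seq[:n]
def elrCounts : List Char → Int → List Int
  | [], _ => []
  | ch :: rest, c =>
    let c' := if ch ≠ '-' then c + 1 else c
    c' :: elrCounts rest c'

def extract_loop_region_alt (a3m_seq : String) (query_seq : String) (q_start : Int) (q_end : Int) : String :=
  let n := min query_seq.toList.length a3m_seq.toList.length
  let counts := elrCounts (query_seq.toList.take n) 0
  -- sum(1 for c in counts if c < q_start) / (c <= q_end)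
  let lo := (counts.filter (fun c => c < q_start)).length
  let hi := (counts.filter (fun c => c ≤ q_end)).length
  -- a3m_seq[lo:hi] (lo, hi ≥ 0), gap-stripped and upper-cased
  String.ofList (((a3m_seq.toList.drop lo).take (hi - lo)).filterMap
    (fun ch => if ch ≠ '-' then some (PySem.Chars.upperChar ch) else none))

-- ===== PRECONDITION & SPEC =====
def Spec_extract_loop_region (a3m_seq : String) (query_seq : String) (q_start : Int) (q_end : Int) (out : String) : Prop := out = extract_loop_region_alt a3m_seq query_seq q_start q_end
instance (a3m_seq : String) (query_seq : String) (q_start : Int) (q_end : Int) (out : String) : Decidable (Spec_extract_loop_region a3m_seq query_seq q_start q_end out) := by unfold Spec_extract_loop_region; infer_instance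

-- ===== CLAIM (what is proved, stated in full; the proofs are below) =====
def Claim_equal_extract_loop_region : Prop := ∀ (a3m_seq : String) (query_seq : String) (q_start : Int) (q_end : Int), Dom_extract_loop_region a3m_seq query_seq q_start q_end → Spec_extract_loop_region a3m_seq query_seq q_start q_end (extract_loop_region a3m_seq query_seq q_start q_end)

-- ===== LEMMAS AND PROOFS =====

-- recursive characterization of A's fold (chars contributed by the remaining columns)
def elrLoopA (q_start q_end : Int) : List (Char × Char) → Int → List Char
  | [], _ => []
  | p :: rest, cnt =>
    let c := if p.1 ≠ '-' then cnt + 1 else cnt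
    (if q_start ≤ c ∧ c ≤ q_end then (if p.2 ≠ '-' then [PySem.Chars.upperChar p.2] else []) else [])
      ++ elrLoopA q_start q_end rest c

theorem elr_foldl_eq_loopA (q_start q_end : Int) (l : List (Char × Char))
    (cnt : Int) (acc : List Char) :
    (l.foldl (elrStepA q_start q_end) (cnt, acc)).2 = acc ++ elrLoopA q_start q_end l cnt := by
  induction l generalizing cnt acc with
  | nil => simp [elrLoopA]
  | cons p rest ih =>
    simp only [List.foldl_cons, elrStepA, elrLoopA]
    split_ifs with h1 h2 <;> simp [ih]

theorem elrCounts_length (l : List Char) (c : Int) : (elrCounts l c).length = l.length := by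
  induction l generalizing c with
  | nil => simp [elrCounts]
  | cons ch rest ih => simp [elrCounts, ih]

theorem elrCounts_filter_lt_nil (qs : Int) (l : List Char) (c : Int) (h : qs ≤ c) :
    (elrCounts l c).filter (fun x => x < qs) = [] := by
  induction l generalizing c with
  | nil => simp [elrCounts]
  | cons ch rest ih =>
    simp only [elrCounts, List.filter_cons]
    have hc : ¬ ((if ch ≠ '-' then c + 1 else c) < qs) := by split_ifs <;> omega
    rw [if_neg (by simpa using hc)]
    exact ih _ (by split_ifs <;> omega)

theorem elrCounts_filter_le_nil (qe : Int) (l : List Char) (c : Int) (h : qe < c) :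
    (elrCounts l c).filter (fun x => x ≤ qe) = [] := by
  induction l generalizing c with
  | nil => simp [elrCounts]
  | cons ch rest ih =>
    simp only [elrCounts, List.filter_cons]
    have hc : ¬ ((if ch ≠ '-' then c + 1 else c) ≤ qe) := by split_ifs <;> omega
    rw [if_neg (by simpa using hc)]
    exact ih _ (by split_ifs <;> omega)

-- the gap-strip/upper-case comprehension of Source B
def elrF (l : List Char) : List Char :=
  l.filterMap (fun ch => if ch ≠ '-' then some (PySem.Chars.upperChar ch) else none)

theorem elrF_cons (a : Char) (l : List Char) :
    elrF (a :: l) = (if a ≠ '-' then [PySem.Chars.upperChar a] else []) ++ elrF l := by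
  simp only [elrF, List.filterMap_cons]
  split_ifs <;> simp

-- main lemma: A's remaining-loop output is B's slice formula on the zipped columns
theorem elr_loopA_eq_slice (qs qe : Int) (l : List (Char × Char)) (cnt : Int) :
    elrLoopA qs qe l cnt =
      elrF (((l.map Prod.snd).drop
        ((elrCounts (l.map Prod.fst) cnt).filter (fun x => x < qs)).length).take
        (((elrCounts (l.map Prod.fst) cnt).filter (fun x => x ≤ qe)).length -
         ((elrCounts (l.map Prod.fst) cnt).filter (fun x => x < qs)).length)) := by
  induction l generalizing cnt with
  | nil => simp [elrLoopA, elrCounts, elrF]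
  | cons p rest ih =>
    simp only [elrLoopA, List.map_cons, elrCounts, List.filter_cons]
    set c := if p.1 ≠ '-' then cnt + 1 else cnt with hc
    have hstep : cnt ≤ c ∧ c ≤ cnt + 1 := by rw [hc]; split_ifs <;> omega
    by_cases hlt : c < qs
    · have b1 : decide (c < qs) = true := decide_eq_true hlt
      rw [if_neg (show ¬(qs ≤ c ∧ c ≤ qe) by omega), if_pos b1]
      by_cases hle : c ≤ qe
      · have b2 : decide (c ≤ qe) = true := decide_eq_true hle
        rw [if_pos b2]
        simp only [List.length_cons, List.drop_succ_cons,
          Nat.succ_sub_succ_eq_sub, List.nil_append]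
        exact ih c
      · have hhi0 : (elrCounts (List.map Prod.fst rest) c).filter (fun x => x ≤ qe) = [] :=
          elrCounts_filter_le_nil qe _ c (by omega)
        rw [if_neg (show ¬(decide (c ≤ qe) = true) by simp [hle]), hhi0, ih c, hhi0]
        simp [elrF]
    · have hlo0 : (elrCounts (List.map Prod.fst rest) c).filter (fun x => x < qs) = [] :=
        elrCounts_filter_lt_nil qs _ c (by omega)
      rw [if_neg (show ¬(decide (c < qs) = true) by simp [hlt]), hlo0]
      by_cases hle : c ≤ qe
      · have b2 : decide (c ≤ qe) = true := decide_eq_true hle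
        rw [if_pos ⟨by omega, hle⟩, if_pos b2, ih c, hlo0]
        simp only [List.length_cons, List.length_nil, List.drop_zero,
          Nat.sub_zero, List.take_succ_cons, elrF_cons]
      · have hhi0 : (elrCounts (List.map Prod.fst rest) c).filter (fun x => x ≤ qe) = [] :=
          elrCounts_filter_le_nil qe _ c (by omega)
        rw [if_neg (show ¬(qs ≤ c ∧ c ≤ qe) by omega),
            if_neg (show ¬(decide (c ≤ qe) = true) by simp [hle]), hhi0, ih c, hlo0, hhi0]
        simp [elrF]

-- zip projections are truncations to the common length
theorem elr_zip_fst (as bs : List Char) :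
    (List.zip as bs).map Prod.fst = as.take (min as.length bs.length) := by
  induction as generalizing bs with
  | nil => simp
  | cons a as ih =>
    cases bs with
    | nil => simp
    | cons b bs => simp [List.zip_cons_cons, ih, Nat.succ_min_succ]

theorem elr_zip_snd (as bs : List Char) :
    (List.zip as bs).map Prod.snd = bs.take (min as.length bs.length) := by
  induction as generalizing bs with
  | nil => simp
  | cons a as ih =>
    cases bs with
    | nil => simp
    | cons b bs => simp [List.zip_cons_cons, ih, Nat.succ_min_succ]

-- ===== VERDICT (by name: the statement is the Claim_ definition above) =====
theorem extract_loop_region_spec : Claim_equal_extract_loop_region := by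
  intro a3m_seq query_seq q_start q_end _
  unfold Spec_extract_loop_region extract_loop_region extract_loop_region_alt
  simp only [elr_foldl_eq_loopA, List.nil_append]
  rw [elr_loopA_eq_slice]
  set xs := a3m_seq.toList
  set qsl := query_seq.toList
  set n := min qsl.length xs.length with hn
  rw [elr_zip_fst, elr_zip_snd, ← hn]
  set counts := elrCounts (qsl.take n) 0
  set lo := (counts.filter (fun x => x < q_start)).length with hlo
  set hi := (counts.filter (fun x => x ≤ q_end)).length with hhi
  have hhn : hi ≤ n := by
    calc hi ≤ counts.length := List.length_filter_le _ _
    _ = (qsl.take n).length := elrCounts_length _ _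
    _ ≤ n := by simp
  -- ((xs.take n).drop lo).take (hi-lo) = (xs.drop lo).take (hi-lo) since hi ≤ n
  have hslice : ((xs.take n).drop lo).take (hi - lo) = (xs.drop lo).take (hi - lo) := by
    rw [List.drop_take, List.take_take]
    congr 1
    omega
  rw [hslice]
  rfl
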